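-- pv_equiv track=rewrite | github.com/YashB63/Daily-Coding-Assesment | 24 Nov/Q1/Q1.py | MaxExponents
-- ===== SOURCE A (Python) =====
-- def MaxExponents(a, b):
--     max_exponent = 0
--     result = a
--
--     for i in range(a, b+1):
--         exponent = 0
--         num = i
--
--         while num % 2 == 0 and num > 1:
--             num //= 2
--             exponent += 1
--
--         if exponent > max_exponent:
--             max_exponent = exponent
--             result = i
--
--     return result
-- ===== SOURCE B (Python) =====
-- def MaxExponents(a, b):
--     # Descend over powers of two: the answer is the smallest multiple of the
--     # largest power of two that has a multiple in [max(a,2), b]; else a.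
--     lo = a if a > 2 else 2
--     if lo > b:
--         return a
--     p = 1
--     while p * 2 <= b:
--         p *= 2
--     while p >= 2:
--         m = ((lo + p - 1) // p) * p
--         if m <= b:
--             return m
--         p //= 2
--     return a
-- ===== Notes on version B (the rewrite author's own statement) =====
-- stated objective: faster
-- what changed: Instead of scanning every i in [a,b] and stripping factors of 2 from each, B descends over powers of two and returns the smallest multiple of the largest power of two that fits in [max(a,2), b], computed by ceiling division.
import Mathlib
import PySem

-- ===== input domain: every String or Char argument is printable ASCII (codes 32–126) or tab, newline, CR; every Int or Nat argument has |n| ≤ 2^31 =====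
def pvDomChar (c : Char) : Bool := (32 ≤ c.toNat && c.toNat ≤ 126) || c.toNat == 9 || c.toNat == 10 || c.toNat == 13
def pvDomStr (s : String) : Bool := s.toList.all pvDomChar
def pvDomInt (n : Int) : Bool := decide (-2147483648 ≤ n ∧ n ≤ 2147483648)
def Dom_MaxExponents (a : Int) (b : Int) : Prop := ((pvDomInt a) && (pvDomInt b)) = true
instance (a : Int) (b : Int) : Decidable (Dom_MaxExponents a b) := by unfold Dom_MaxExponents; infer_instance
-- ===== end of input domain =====

-- B: instead of A's scan of every i in [a,b], descend over powers of two and take the smallest multiple of the largest power of two fitting in [max(a,2), b] (O(log b) steps vs O(b-a) iterations).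

-- ===== PORT A =====
-- A's inner while loop: strips factors of 2 from num, counting them onto `exponent`
def pvCountExp (num : Int) (exponent : Int) : Int :=
  if h : PySem.Int.mod num 2 = 0 ∧ num > 1 then
    pvCountExp (PySem.Int.floordiv num 2) (exponent + 1)
  else exponent
termination_by num.toNat
decreasing_by
  have : PySem.Int.floordiv num 2 = num / 2 := PySem.Int.floordiv_eq_ediv_of_pos (by omega)
  rw [this]; omega

-- A's loop body: update (max_exponent, result) with the exponent of i
def pvF (st : Int × Int) (i : Int) : Int × Int :=
  let exponent := pvCountExp i 0
  if exponent > st.1 then (exponent, i) else st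

def MaxExponents (a : Int) (b : Int) : Int :=
  ((PySem.List.pyRange a (b+1) 1).foldl pvF (0, a)).2

-- ===== PORT B =====
-- Source B: `while p * 2 <= b: p *= 2`  (p starts at 1; its positivity is invariant, carried for termination)
def pvGrow (b : Int) (p : Int) (hp : 1 ≤ p) : Int :=
  if h : p * 2 ≤ b then pvGrow b (p * 2) (by omega) else p
termination_by (b - p).toNat
decreasing_by omega

def pvDescend (a lo b : Int) (p : Int) : Int :=
  if h : p ≥ 2 then
    let m := PySem.Int.floordiv (lo + p - 1) p * p
    if m ≤ b then m
    else pvDescend a lo b (PySem.Int.floordiv p 2)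
  else a
termination_by p.toNat
decreasing_by
  have : PySem.Int.floordiv p 2 = p / 2 := PySem.Int.floordiv_eq_ediv_of_pos (by omega)
  rw [this]; omega

def MaxExponents_alt (a : Int) (b : Int) : Int :=
  let lo := if a > 2 then a else 2
  if lo > b then a
  else pvDescend a lo b (pvGrow b 1 (by omega))

-- ===== PRECONDITION & SPEC =====
def Spec_MaxExponents (a : Int) (b : Int) (out : Int) : Prop := out = MaxExponents_alt a b
instance (a : Int) (b : Int) (out : Int) : Decidable (Spec_MaxExponents a b out) := by unfold Spec_MaxExponents; infer_instance

-- ===== CLAIM (what is proved, stated in full; the proofs are below) =====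
def Claim_equal_MaxExponents : Prop := ∀ (a : Int) (b : Int), Dom_MaxExponents a b → Spec_MaxExponents a b (MaxExponents a b)

-- ===== LEMMAS AND PROOFS =====

theorem pvCountExp_acc (num acc : Int) : pvCountExp num acc = pvCountExp num 0 + acc := by
  by_cases h : PySem.Int.mod num 2 = 0 ∧ num > 1
  · rw [pvCountExp, dif_pos h]
    conv_rhs => rw [pvCountExp, dif_pos h]
    rw [pvCountExp_acc (PySem.Int.floordiv num 2) (acc+1),
        pvCountExp_acc (PySem.Int.floordiv num 2) (0+1)]
    omega
  · rw [pvCountExp, dif_neg h]; rw [pvCountExp, dif_neg h]; omega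
termination_by num.toNat
decreasing_by
  all_goals
    have : PySem.Int.floordiv num 2 = num / 2 := PySem.Int.floordiv_eq_ediv_of_pos (by omega)
    rw [this]; omega

theorem pvCountExp_nonneg (num : Int) : 0 ≤ pvCountExp num 0 := by
  by_cases h : PySem.Int.mod num 2 = 0 ∧ num > 1
  · rw [pvCountExp, dif_pos h, pvCountExp_acc]
    have := pvCountExp_nonneg (PySem.Int.floordiv num 2)
    omega
  · rw [pvCountExp, dif_neg h]
termination_by num.toNat
decreasing_by
  have : PySem.Int.floordiv num 2 = num / 2 := PySem.Int.floordiv_eq_ediv_of_pos (by omega)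
  rw [this]; omega

theorem pvCountExp_le_one (num : Int) (h : num ≤ 1) : pvCountExp num 0 = 0 := by
  rw [pvCountExp, dif_neg (by omega)]

-- characterization: for num ≥ 1, pvCountExp num 0 is the 2-adic valuation
theorem pvCountExp_char (num : Int) (h1 : 1 ≤ num) :
    ∃ k : ℕ, pvCountExp num 0 = (k : Int) ∧ ((2:Int)^k ∣ num) ∧ ¬ ((2:Int)^(k+1) ∣ num) := by
  by_cases h : PySem.Int.mod num 2 = 0 ∧ num > 1
  · have hdvd : (2:Int) ∣ num := (PySem.Int.mod_eq_zero_iff_dvd num 2).1 h.1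
    have hfd : PySem.Int.floordiv num 2 = num / 2 := PySem.Int.floordiv_eq_ediv_of_pos (by omega)
    have h2 : num = 2 * (num / 2) := by omega
    have hpos : 1 ≤ num / 2 := by omega
    obtain ⟨k, hk, hdv, hnd⟩ := pvCountExp_char (PySem.Int.floordiv num 2) (by omega)
    refine ⟨k + 1, ?_, ?_, ?_⟩
    · rw [pvCountExp, dif_pos h, pvCountExp_acc, hk]; push_cast; ring
    · rw [hfd] at hdv
      calc (2:Int)^(k+1) = 2 * 2^k := by ring
      _ ∣ 2 * (num / 2) := mul_dvd_mul_left 2 hdv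
      _ = num := h2.symm
    · intro hc
      apply hnd
      rw [hfd]
      obtain ⟨t, ht⟩ := hc
      have ht' : num = 2 * ((2:Int)^(k+1) * t) := by rw [ht]; ring
      exact ⟨t, by omega⟩
  · refine ⟨0, by rw [pvCountExp, dif_neg h]; norm_num, by simp, ?_⟩
    intro hc
    have h2 : (2:Int) ∣ num := by simpa using hc
    rcases not_and_or.1 h with hm | hn
    · exact hm ((PySem.Int.mod_eq_zero_iff_dvd num 2).2 h2)
    · obtain ⟨t, ht⟩ := h2
      omega
termination_by num.toNat
decreasing_by
  have : PySem.Int.floordiv num 2 = num / 2 := PySem.Int.floordiv_eq_ediv_of_pos (by omega)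
  rw [this]; omega

-- divisibility ↔ lower bound on the counted exponent
theorem pvCountExp_ge_iff (i : Int) (hi : 1 ≤ i) (e : ℕ) :
    (e : Int) ≤ pvCountExp i 0 ↔ (2:Int)^e ∣ i := by
  obtain ⟨k, hk, hdv, hnd⟩ := pvCountExp_char i hi
  rw [hk]
  constructor
  · intro hle
    exact dvd_trans (pow_dvd_pow 2 (by exact_mod_cast hle)) hdv
  · intro hd
    by_contra hlt
    have hke : k + 1 ≤ e := by omega
    exact hnd (dvd_trans (pow_dvd_pow 2 hke) hd)

theorem pvCountExp_pos_two_le (i : Int) (h : 1 ≤ pvCountExp i 0) : 2 ≤ i := by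
  by_contra hc
  rw [pvCountExp_le_one i (by omega)] at h
  omega

-- smallest multiple of p that is ≥ lo, via ceiling division
theorem pvCeil_spec (lo p : Int) (hp : 1 ≤ p) :
    p ∣ (PySem.Int.floordiv (lo + p - 1) p * p) ∧
    lo ≤ PySem.Int.floordiv (lo + p - 1) p * p ∧
    ∀ x, p ∣ x → lo ≤ x → PySem.Int.floordiv (lo + p - 1) p * p ≤ x := by
  have hfd : PySem.Int.floordiv (lo + p - 1) p = (lo + p - 1) / p :=
    PySem.Int.floordiv_eq_ediv_of_pos (by omega)
  set q := (lo + p - 1) / p with hq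
  have hdm : q * p + (lo + p - 1) % p = lo + p - 1 := by
    rw [hq, mul_comm]; exact Int.mul_ediv_add_emod _ _
  have hr0 : 0 ≤ (lo + p - 1) % p := Int.emod_nonneg _ (by omega)
  have hrp : (lo + p - 1) % p < p := Int.emod_lt_of_pos _ (by omega)
  rw [hfd]
  refine ⟨⟨q, mul_comm q p⟩, by omega, ?_⟩
  intro x hx hlox
  obtain ⟨t, ht⟩ := hx
  have htq : q ≤ t := by
    by_contra hc
    rw [not_le] at hc
    have : t * p ≤ (q - 1) * p := by
      apply mul_le_mul_of_nonneg_right (by omega) (by omega)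
    nlinarith
  calc q * p ≤ t * p := by apply mul_le_mul_of_nonneg_right htq (by omega)
  _ = x := by rw [ht, mul_comm]

theorem pvGrow_spec (b p : Int) (hp : 1 ≤ p) (hb : p ≤ b) :
    ∃ k : ℕ, pvGrow b p hp = p * 2^k ∧ pvGrow b p hp ≤ b ∧ b < pvGrow b p hp * 2 := by
  by_cases h : p * 2 ≤ b
  · obtain ⟨k, hk, h1, h2⟩ := pvGrow_spec b (p * 2) (by omega) h
    refine ⟨k + 1, ?_, ?_, ?_⟩
    · rw [pvGrow, dif_pos h, hk]; ring
    · rw [pvGrow, dif_pos h]; exact h1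
    · rw [pvGrow, dif_pos h]; exact h2
  · exact ⟨0, by rw [pvGrow, dif_neg h]; ring, by rw [pvGrow, dif_neg h]; omega,
      by rw [pvGrow, dif_neg h]; omega⟩
termination_by (b - p).toNat
decreasing_by omega

-- there is a multiple of 2^e in [lo, b]
def pvMult (lo b : Int) (e : ℕ) : Prop := ∃ i, lo ≤ i ∧ i ≤ b ∧ (2:Int)^e ∣ i

theorem pvDescend_spec (a lo b : Int) (j : ℕ) :
    (pvDescend a lo b ((2:Int)^j) = a ∧ ∀ e : ℕ, 1 ≤ e → e ≤ j → ¬ pvMult lo b e)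
    ∨ (∃ E : ℕ, 1 ≤ E ∧ E ≤ j ∧ (∀ e : ℕ, e ≤ j → pvMult lo b e → e ≤ E) ∧
        pvDescend a lo b ((2:Int)^j) = PySem.Int.floordiv (lo + 2^E - 1) (2^E) * 2^E ∧
        PySem.Int.floordiv (lo + 2^E - 1) (2^E) * 2^E ≤ b) := by
  induction j with
  | zero =>
      left
      constructor
      · rw [pvDescend, dif_neg (by norm_num)]
      · intro e he1 he2 _; omega
  | succ j ih =>
      have hpow : (1:Int) ≤ 2^j := one_le_pow₀ (by norm_num)
      have hsucc : ((2:Int)^(j+1)) = 2^j * 2 := by ring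
      have hge : ((2:Int)^(j+1)) ≥ 2 := by rw [hsucc]; omega
      have hhalf : PySem.Int.floordiv ((2:Int)^(j+1)) 2 = 2^j := by
        rw [PySem.Int.floordiv_eq_ediv_of_pos (by omega), hsucc]
        exact Int.mul_ediv_cancel _ (by norm_num)
      obtain ⟨hdvd, hlom, hmin⟩ := pvCeil_spec lo ((2:Int)^(j+1)) (by omega)
      set m := PySem.Int.floordiv (lo + 2^(j+1) - 1) (2^(j+1)) * 2^(j+1) with hm
      by_cases hmb : m ≤ b
      · right
        refine ⟨j + 1, by omega, le_refl _, fun e _ _ => by omega, ?_, hmb⟩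
        rw [pvDescend, dif_pos hge]
        simp only [← hm, if_pos hmb]
      · have hnomult : ¬ pvMult lo b (j+1) := by
          rintro ⟨i, hloi, hib, hdi⟩
          exact hmb (le_trans (hmin i hdi hloi) hib)
        have hrec : pvDescend a lo b ((2:Int)^(j+1)) = pvDescend a lo b ((2:Int)^j) := by
          rw [pvDescend, dif_pos hge]
          simp only [← hm, if_neg hmb, hhalf]
        rcases ih with ⟨heq, hnone⟩ | ⟨E, hE1, hEj, hmax, heq, hle⟩
        · left
          refine ⟨by rw [hrec]; exact heq, ?_⟩
          intro e he1 he2 hmult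
          rcases Nat.lt_or_ge e (j+1) with hlt | hge'
          · exact hnone e he1 (by omega) hmult
          · have : e = j + 1 := by omega
            exact hnomult (this ▸ hmult)
        · right
          refine ⟨E, hE1, by omega, ?_, by rw [hrec]; exact heq, hle⟩
          intro e hej hmult
          rcases Nat.lt_or_ge e (j+1) with hlt | hge'
          · exact hmax e (by omega) hmult
          · have : e = j + 1 := by omega
            exact absurd (this ▸ hmult) hnomult

-- invariant of A's fold over [a, b]: the state is (max exponent so far, first i attaining it)
def pvInv (a b : Int) (st : Int × Int) : Prop :=
  (st.1 = 0 ∧ st.2 = a ∧ ∀ i, a ≤ i → i ≤ b → pvCountExp i 0 ≤ 0) ∨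
  (1 ≤ st.1 ∧ a ≤ st.2 ∧ st.2 ≤ b ∧ pvCountExp st.2 0 = st.1 ∧
    (∀ i, a ≤ i → i ≤ b → pvCountExp i 0 ≤ st.1) ∧
    (∀ i, a ≤ i → i < st.2 → pvCountExp i 0 < st.1))

theorem pvFold_inv (a b : Int) :
    pvInv a b ((PySem.List.pyRange a (b+1) 1).foldl pvF (0, a)) := by
  rcases lt_or_ge b a with hba | hab
  · rw [PySem.List.pyRange_one_eq_nil (by omega), List.foldl_nil]
    left
    exact ⟨rfl, rfl, fun i h1 h2 => by omega⟩
  · have hsplit : PySem.List.pyRange a (b+1) 1 = PySem.List.pyRange a b 1 ++ [b] :=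
      PySem.List.pyRange_one_succ_right hab
    rw [hsplit, List.foldl_append, List.foldl_cons, List.foldl_nil]
    have ih := pvFold_inv a (b-1)
    rw [show b - 1 + 1 = b by ring] at ih
    set st := (PySem.List.pyRange a b 1).foldl pvF (0, a) with hst
    have hnn := pvCountExp_nonneg b
    rcases ih with ⟨h1, h2, h3⟩ | ⟨h1, h2, h3, h4, h5, h6⟩
    · by_cases hub : pvCountExp b 0 > st.1
      · right
        rw [pvF, if_pos hub]
        refine ⟨by omega, hab, le_refl b, rfl, ?_, ?_⟩
        · intro i hi1 hi2
          rcases lt_or_ge i b with hlt | hge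
          · have := h3 i hi1 (by omega); omega
          · have : i = b := by omega
            subst this; omega
        · intro i hi1 hi2
          have := h3 i hi1 (by omega); omega
      · left
        rw [pvF, if_neg hub]
        refine ⟨h1, h2, ?_⟩
        intro i hi1 hi2
        rcases lt_or_ge i b with hlt | hge
        · exact h3 i hi1 (by omega)
        · have : i = b := by omega
          subst this; omega
    · by_cases hub : pvCountExp b 0 > st.1
      · right
        rw [pvF, if_pos hub]
        refine ⟨by omega, hab, le_refl b, rfl, ?_, ?_⟩
        · intro i hi1 hi2
          rcases lt_or_ge i b with hlt | hge
          · have := h5 i hi1 (by omega); omega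
          · have : i = b := by omega
            subst this; omega
        · intro i hi1 hi2
          have := h5 i hi1 (by omega); omega
      · right
        rw [pvF, if_neg hub]
        refine ⟨h1, h2, by omega, h4, ?_, h6⟩
        intro i hi1 hi2
        rcases lt_or_ge i b with hlt | hge
        · exact h5 i hi1 (by omega)
        · have : i = b := by omega
          subst this; omega
termination_by (b + 1 - a).toNat
decreasing_by omega

theorem pvMult_pow_le (lo b : Int) (e : ℕ) (h2 : 2 ≤ lo) (hm : pvMult lo b e) :
    (2:Int)^e ≤ b := by
  obtain ⟨i, h1, hb, hd⟩ := hm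
  exact le_trans (Int.le_of_dvd (by omega) hd) hb

theorem MaxExponents_main (a b : Int) : MaxExponents a b = MaxExponents_alt a b := by
  have hinv := pvFold_inv a b
  unfold MaxExponents MaxExponents_alt
  set st := (PySem.List.pyRange a (b+1) 1).foldl pvF (0, a) with hst
  set lo := if a > 2 then a else 2 with hlo
  have hloA : a ≤ lo ∧ 2 ≤ lo ∧ (lo = a ∨ lo = 2) := by
    rw [hlo]; split_ifs <;> omega
  by_cases hlob : lo > b
  · rw [if_pos hlob]
    rcases hinv with ⟨h1, h2, h3⟩ | ⟨h1, h2, h3, h4, h5, h6⟩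
    · exact h2
    · exfalso
      have hst2 : 2 ≤ st.2 := pvCountExp_pos_two_le st.2 (by omega)
      omega
  · rw [if_neg hlob]
    have hb2 : 2 ≤ b := by omega
    obtain ⟨k, hk, hkb, hkb2⟩ := pvGrow_spec b 1 (by omega) (by omega)
    rw [one_mul] at hk
    rw [hk]
    have hbound : ∀ e : ℕ, pvMult lo b e → e ≤ k := by
      intro e hm
      have h1 := pvMult_pow_le lo b e hloA.2.1 hm
      have h2 : (2:Int)^e < 2^(k+1) := by
        rw [hk] at hkb2
        calc (2:Int)^e ≤ b := h1
        _ < 2^k * 2 := hkb2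
        _ = 2^(k+1) := by ring
      have := (pow_lt_pow_iff_right₀ (by norm_num : (1:Int) < 2)).1 h2
      omega
    rcases pvDescend_spec a lo b k with ⟨heqd, hnone⟩ | ⟨E, hE1, hEk, hmax, heqd, hmble⟩
    · rw [heqd]
      rcases hinv with ⟨h1, h2, h3⟩ | ⟨h1, h2, h3, h4, h5, h6⟩
      · exact h2
      · exfalso
        have hst2 : 2 ≤ st.2 := pvCountExp_pos_two_le st.2 (by omega)
        have hdv : (2:Int)^1 ∣ st.2 := by
          apply (pvCountExp_ge_iff st.2 (by omega) 1).1
          push_cast; omega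
        have hmult : pvMult lo b 1 := ⟨st.2, by omega, h3, hdv⟩
        exact hnone 1 (le_refl 1) (hbound 1 hmult) hmult
    · rw [heqd]
      obtain ⟨hdvd, hlom, hmin⟩ := pvCeil_spec lo ((2:Int)^E) (one_le_pow₀ (by norm_num))
      set m := PySem.Int.floordiv (lo + 2^E - 1) (2^E) * 2^E with hm
      have hmaxall : ∀ e : ℕ, pvMult lo b e → e ≤ E := fun e hme => hmax e (hbound e hme) hme
      have hm1 : (1:Int) ≤ m := by omega
      have hgeE : (E:Int) ≤ pvCountExp m 0 := (pvCountExp_ge_iff m hm1 E).2 hdvd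
      have hcntm : pvCountExp m 0 = (E:Int) := by
        obtain ⟨km, hkm, hdm, _⟩ := pvCountExp_char m hm1
        have : km ≤ E := hmaxall km ⟨m, hlom, hmble, hdm⟩
        rw [hkm] at hgeE ⊢
        have : (km:Int) ≤ E := by exact_mod_cast this
        omega
      rcases hinv with ⟨h1, h2, h3⟩ | ⟨h1, h2, h3, h4, h5, h6⟩
      · exfalso
        have := h3 m (by omega) hmble
        omega
      · have hst2 : 2 ≤ st.2 := pvCountExp_pos_two_le st.2 (by omega)
        have hstE : st.1 = (E:Int) := by
          obtain ⟨k2, hk2, hd2, _⟩ := pvCountExp_char st.2 (by omega)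
          have hmst : pvMult lo b k2 := ⟨st.2, by omega, h3, hd2⟩
          have hle : (k2:Int) ≤ E := by exact_mod_cast hmaxall k2 hmst
          have hge : (E:Int) ≤ st.1 := by
            have := h5 m (by omega) hmble
            omega
          omega
        rcases lt_trichotomy st.2 m with hlt | heq | hgt
        · exfalso
          have hdv2 : (2:Int)^E ∣ st.2 := by
            apply (pvCountExp_ge_iff st.2 (by omega) E).1
            omega
          have := hmin st.2 hdv2 (by omega)
          omega
        · exact heq
        · exfalso
          have := h6 m (by omega) hgt
          omega

-- ===== VERDICT (by name: the statement is the Claim_ definition above) =====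
theorem MaxExponents_spec : Claim_equal_MaxExponents := by
  intro a b _
  unfold Spec_MaxExponents
  exact MaxExponents_main a b
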